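-- pv_equiv track=rewrite | github.com/yrk06/Pybil | interpretador.py | variavel
-- ===== SOURCE A (Python) =====
-- def variavel(string):
--     if string[0] != '$':
--         return None, string
--     buffer = ""
--     final_idx = len(string)
--     for idx, c in enumerate(string[1:]):
--         if c in list(map(lambda a: str(a),range(10))):
--             buffer += c
--         else:
--             final_idx = idx+1
--             break
--     value = 0
--     try:
--         value = int(buffer)
--     except:
--         return None, string
--     if value >= 2048:
--         return None, string
--     return value, string[final_idx:].strip()
-- ===== SOURCE B (Python) =====
-- def variavel(string):
--     if string[0] != '$':
--         return None, string
--     rest = string[1:]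
--     tail = rest.lstrip("0123456789")
--     digits = rest[:len(rest) - len(tail)]
--     if not digits:
--         return None, string
--     value = int(digits)
--     if value >= 2048:
--         return None, string
--     return value, tail.strip()
-- ===== Notes on version B (the rewrite author's own statement) =====
-- stated objective: idiomatic
-- what changed: Replaces A's explicit enumerate loop with its string buffer, break-index bookkeeping and try/except around int() by str.lstrip with the ten digit characters plus slicing: the leading-digit run and the remainder come directly from string methods with no explicit loop or exception handling.
import Mathlib
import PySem

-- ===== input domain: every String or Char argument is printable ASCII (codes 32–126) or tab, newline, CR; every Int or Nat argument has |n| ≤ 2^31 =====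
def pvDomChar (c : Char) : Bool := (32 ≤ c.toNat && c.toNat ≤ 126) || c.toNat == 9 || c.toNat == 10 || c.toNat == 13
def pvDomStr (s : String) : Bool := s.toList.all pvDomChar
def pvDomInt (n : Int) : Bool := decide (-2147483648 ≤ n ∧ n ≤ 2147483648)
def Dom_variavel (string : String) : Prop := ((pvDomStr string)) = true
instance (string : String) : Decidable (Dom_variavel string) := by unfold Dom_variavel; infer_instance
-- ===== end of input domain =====

-- B replaces A's char-by-char accumulator loop by str.lstrip("0123456789")/slicing (idiomatic, no explicit loop); return values are identical, A's IndexError on "" is excluded by Pre_.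

-- decimal value of an all-digit char list; exact port of int(s) for nonempty strings of chars '0'..'9'
def pvDigitsVal (cs : List Char) : Int := cs.foldl (fun a c => 10 * a + ((c.toNat : Int) - 48)) 0

-- ===== PORT A =====
-- `c in list(map(lambda a: str(a), range(10)))` : membership of the char in "0"... "9"
def pvIsDig (c : Char) : Bool := (['0','1','2','3','4','5','6','7','8','9'] : List Char).contains c

-- `for idx, c in enumerate(string[1:]) : …` with buffer accumulation and break;
-- returns (buffer, some final_idx) on break, (buffer, none) when the loop runs out
def pvALoop : List Char → Nat → List Char → List Char × Option Nat
  | [], _, buf => (buf, none)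
  | c :: cs, idx, buf =>
      if pvIsDig c then pvALoop cs (idx + 1) (buf ++ [c]) else (buf, some (idx + 1))

def variavel (string : String) : Option Int × String :=
  match string.toList with
  | [] => (none, string)          -- string[0] raises IndexError here; excluded by Pre_variavel
  | c0 :: rest =>                 -- c0 = string[0], rest = string[1:]
    if c0 ≠ '$' then (none, string)
    else
      let r := pvALoop rest 0 []
      let buf := r.1
      let final_idx : Nat := r.2.getD string.toList.length   -- final_idx = len(string) unless the loop broke
      match buf with
      | [] => (none, string)      -- value = int("") raises ValueError, caught by the try/except
      | _ :: _ =>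
        let value := pvDigitsVal buf   -- int(buffer): buffer holds only chars '0'..'9', exact there
        if value ≥ 2048 then (none, string)
        else (some value, String.mk (PySem.Chars.strip (PySem.List.slice string.toList (some (final_idx : Int)) none)))

-- ===== PORT B =====
def variavel_alt (string : String) : Option Int × String :=
  match string.toList with
  | [] => (none, string)          -- string[0] raises IndexError here; excluded by Pre_variavel
  | c0 :: rest =>                 -- c0 = string[0], rest = string[1:]
    if c0 ≠ '$' then (none, string)
    else
      let tail := rest.dropWhile pvIsDig                     -- rest.lstrip("0123456789"): exact (drops leading chars of that set)
      let digits := rest.take (rest.length - tail.length)    -- rest[:len(rest)-len(tail)]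
      if digits.isEmpty then (none, string)
      else
        let value := pvDigitsVal digits                      -- int(digits): digits is nonempty, all '0'..'9'; exact there
        if value ≥ 2048 then (none, string)
        else (some value, String.mk (PySem.Chars.strip tail))

-- ===== PRECONDITION & SPEC =====
-- Pre_ excludes only the empty string, on which A raises IndexError at string[0].
def Pre_variavel (string : String) : Prop := string ≠ ""
instance (string : String) : Decidable (Pre_variavel string) := by unfold Pre_variavel; infer_instance
def pvWitness_variavel : String := "$12 x"

def Spec_variavel (string : String) (out : Option Int × String) : Prop := out = variavel_alt string
instance (string : String) (out : Option Int × String) : Decidable (Spec_variavel string out) := by unfold Spec_variavel; infer_instance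

-- ===== CLAIM (what is proved, stated in full; the proofs are below) =====
def Claim_equal_variavel : Prop := ∀ (string : String), Dom_variavel string → Pre_variavel string → Spec_variavel string (variavel string)

-- ===== LEMMAS AND PROOFS =====

-- A's loop computes the takeWhile/dropWhile decomposition of its input
theorem pvALoop_eq (l : List Char) (idx : Nat) (buf : List Char) :
    pvALoop l idx buf =
      (buf ++ l.takeWhile pvIsDig,
       if l.dropWhile pvIsDig = [] then none else some (idx + (l.takeWhile pvIsDig).length + 1)) := by
  induction l generalizing idx buf with
  | nil => simp [pvALoop]
  | cons c cs ih =>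
    by_cases hc : pvIsDig c
    · simp only [pvALoop, hc, ih, if_true, List.takeWhile_cons_of_pos,
        List.dropWhile_cons_of_pos, List.append_assoc, List.singleton_append]
      refine Prod.ext rfl ?_
      split_ifs
      · rfl
      · simp only [Option.some.injEq, List.length_cons]; omega
    · simp [pvALoop, hc]

theorem variavel_spec_aux (string : String) : variavel string = variavel_alt string := by
  unfold variavel variavel_alt
  cases h : string.toList with
  | nil => rfl
  | cons c0 rest =>
    by_cases hc : c0 = '$'
    · subst hc
      simp only [ne_eq, not_true_eq_false, if_false]
      rw [pvALoop_eq]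
      set tk := rest.takeWhile pvIsDig with htk
      set tl := rest.dropWhile pvIsDig with htl
      have hsplit : tk ++ tl = rest := List.takeWhile_append_dropWhile
      have hlen : tk.length + tl.length = rest.length := by
        rw [← List.length_append, hsplit]
      have hdig : rest.take (rest.length - tl.length) = tk := by
        have he : rest.length - tl.length = tk.length := by omega
        rw [he, ← hsplit, List.take_left]
      simp only [hdig]
      cases htk0 : tk with
      | nil => simp
      | cons d ds =>
        have hdrop : ('$' :: rest).drop (tk.length + 1) = tl := by
          simp only [List.drop_succ_cons]
          rw [← hsplit, List.drop_left]
        have hs1 : PySem.List.slice ('$' :: rest) (some ((rest.length : Int) + 1)) none = ([] : List Char) := by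
          have h2 : ((rest.length : Int) + 1) = (((rest.length + 1 : Nat)) : Int) := by push_cast; ring
          rw [h2, PySem.List.slice_from_natCast]
          simp
        have hs2 : PySem.List.slice ('$' :: rest) (some ((ds.length : Int) + 1 + 1)) none = tl := by
          have h2 : ((ds.length : Int) + 1 + 1) = (((ds.length + 1 + 1 : Nat)) : Int) := by push_cast; ring
          rw [h2, PySem.List.slice_from_natCast]
          have he : ds.length + 1 + 1 = tk.length + 1 := by simp [htk0]
          rw [he]; exact hdrop
        by_cases hb : tl = []
        · simp [hb, hs1]
        · simp [hb, hs2]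
    · simp [hc]

-- ===== VERDICT (by name: the statement is the Claim_ definition above) =====
theorem variavel_spec : Claim_equal_variavel := by
  intro string _ _
  unfold Spec_variavel
  exact variavel_spec_aux string
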